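-- pv_equiv track=rewrite | github.com/xingzewu24/openclaw-dut | scripts/dlut_portal_probe.py | extract_context_around_keywords
-- ===== SOURCE A (Python) =====
-- def extract_context_around_keywords(text, keywords, context_lines=5):
--     """提取关键词周围的上下文代码块"""
--     lines = text.split('\n')
--     results = []
--     seen_ranges = set()
--
--     for i, line in enumerate(lines):
--         line_lower = line.lower()
--         for kw in keywords:
--             if kw.lower() in line_lower:
--                 start = max(0, i - context_lines)
--                 end = min(len(lines), i + context_lines + 1)
--                 range_key = (start, end)
--                 if range_key not in seen_ranges:
--                     seen_ranges.add(range_key)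
--                     context = '\n'.join(f"{j+1:4d}: {lines[j]}" for j in range(start, end))
--                     results.append((kw, i + 1, context))
--                 break
--     return results
-- ===== SOURCE B (Python) =====
-- def extract_context_around_keywords(text, keywords, context_lines=5):
--     lines = text.split('\n')
--     lows = [line.lower() for line in lines]
--
--     # Keyword-major detection over a shrinking pool: each keyword in turn claims
--     # the so-far-unclaimed lines it matches, so winner[i] is the FIRST keyword
--     # (in list order) whose lowercase occurs in line i.
--     winner = {}
--     unassigned = list(range(len(lines)))
--     for kw in keywords:
--         kl = kw.lower()
--         still = []
--         for i in unassigned: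
--             if kl in lows[i]:
--                 winner[i] = kw
--             else:
--                 still.append(i)
--         unassigned = still
--
--     # Group by context range: the first (lowest) matching line claims each range.
--     by_range = {}
--     for i in sorted(winner):
--         start = max(0, i - context_lines)
--         end = min(len(lines), i + context_lines + 1)
--         by_range.setdefault((start, end), (winner[i], i))
--
--     # Assemble the numbered context blocks at the end, straight from the grouping.
--     return [(kw, i + 1, '\n'.join(f"{j+1:4d}: {lines[j]}" for j in range(s, e)))
--             for (s, e), (kw, i) in by_range.items()]
-- ===== Notes on version B (the rewrite author's own statement) =====
-- stated objective: alternative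
-- what changed: Replaces A's line-major scan (per-line keyword loop with break, inline range dedup via a seen-set and inline context assembly) by a keyword-major sweep over a shrinking pool of unclaimed line indices (each keyword in turn claims the unclaimed lines it matches, so the first keyword in list order wins per line), then groups matches by context range into a dict via setdefault over the sorted matched indices, and renders the numbered blocks in one final comprehension.
import Mathlib
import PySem

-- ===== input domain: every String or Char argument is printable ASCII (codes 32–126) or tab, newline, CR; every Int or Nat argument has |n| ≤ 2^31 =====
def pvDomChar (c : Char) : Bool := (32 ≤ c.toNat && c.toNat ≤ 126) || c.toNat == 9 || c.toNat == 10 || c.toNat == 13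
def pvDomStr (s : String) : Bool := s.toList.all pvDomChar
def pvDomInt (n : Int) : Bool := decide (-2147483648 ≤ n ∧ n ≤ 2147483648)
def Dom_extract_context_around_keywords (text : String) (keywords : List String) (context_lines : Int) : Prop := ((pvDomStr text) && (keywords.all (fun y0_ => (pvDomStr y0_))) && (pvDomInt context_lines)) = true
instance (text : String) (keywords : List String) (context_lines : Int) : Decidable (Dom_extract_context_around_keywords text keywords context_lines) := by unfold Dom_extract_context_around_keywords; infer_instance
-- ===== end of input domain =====

-- B replaces A's line-major scan (per-line keyword loop with break, inline seen-set dedup and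
-- inline context assembly) by a keyword-major sweep over a shrinking pool of unclaimed lines,
-- a range-grouping dict built with setdefault over the sorted matched lines, and one final
-- rendering comprehension (alternative decomposition, similar cost).

-- shared helper: the f-string f"{j+1:4d}: {lines[j]}" (identical in both Pythons)
def pvFmtLine (lines : List String) (j : Int) : String :=
  let s := PySem.Int.toStr (j + 1)
  PySem.Str.join "" [String.ofList (List.replicate (4 - s.toList.length) ' '), s, ": ", PySem.List.pyGetD lines j ""]

-- shared helper: '\n'.join(... for j in range(start, end)) (identical in both Pythons)
def pvContext (lines : List String) (start e : Int) : String :=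
  PySem.Str.join "\n" ((PySem.List.pyRange start e 1).map (pvFmtLine lines))

-- ===== PORT A =====
-- the inner 'for kw in keywords: … break' loop, acting on the (results, seen_ranges) state
def pvInnerA (lines : List String) (cl : Int) (i : Int) (lineLower : String)
    (kws : List String) (st : List (String × Int × String) × PySem.Set (Int × Int)) :
    List (String × Int × String) × PySem.Set (Int × Int) :=
  match kws with
  | [] => st
  | kw :: rest =>
    if PySem.Str.isIn (PySem.Str.lower kw) lineLower then
      let start := max 0 (i - cl)
      let e := min ((lines.length : Int)) (i + cl + 1)
      if PySem.Set.contains st.2 (start, e) then st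
      else (st.1 ++ [(kw, i + 1, pvContext lines start e)], PySem.Set.add st.2 (start, e))
    else pvInnerA lines cl i lineLower rest st

def extract_context_around_keywords (text : String) (keywords : List String) (context_lines : Int) : List (String × Int × String) :=
  let lines := (PySem.Str.split? text "\n").getD []   -- sep "\n" ≠ "", split? is always some
  ((PySem.List.enumerate lines 0).foldl
    (fun st p => pvInnerA lines context_lines p.1 (PySem.Str.lower p.2) keywords st)
    ([], PySem.Set.empty)).1

-- ===== PORT B =====
-- the detection sweep: 'for kw in keywords: for i in unassigned: if kl in lows[i]: winner[i] = kw / else: still.append(i)'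
-- (lows[i]: every i in the pool is a valid index, so pyGetD is exact on every reached lookup)
def pvWinner (keywords : List String) (lows : List String) (n : Int) : PySem.Dict Int String :=
  (keywords.foldl (fun st kw =>
      let kl := PySem.Str.lower kw
      st.2.foldl (fun st2 i =>
          if PySem.Str.isIn kl (PySem.List.pyGetD lows i "") then (st2.1.insert i kw, st2.2)
          else (st2.1, st2.2 ++ [i]))
        (st.1, ([] : List Int)))
    ((PySem.Dict.empty : PySem.Dict Int String), PySem.List.pyRange 0 n 1)).1

-- 'for i in sorted(winner): by_range.setdefault((start, end), (winner[i], i))'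
-- (winner[i]: the key i comes from winner itself, so the KeyError branch is unreachable; getD is exact here)
def pvByRange (lines : List String) (cl : Int) (winner : PySem.Dict Int String) :
    PySem.Dict (Int × Int) (String × Int) :=
  (PySem.List.sorted winner.keys (fun x => x) false).foldl
    (fun d i => d.setdefault (max 0 (i - cl), min ((lines.length : Int)) (i + cl + 1)) (winner.getD i "", i))
    PySem.Dict.empty

def extract_context_around_keywords_alt (text : String) (keywords : List String) (context_lines : Int) : List (String × Int × String) :=
  let lines := (PySem.Str.split? text "\n").getD []   -- sep "\n" ≠ "", split? is always some
  let lows := lines.map PySem.Str.lower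
  let winner := pvWinner keywords lows (lines.length : Int)
  let byRange := pvByRange lines context_lines winner
  byRange.items.map (fun q => (q.2.1, q.2.2 + 1, pvContext lines q.1.1 q.1.2))

-- ===== PRECONDITION & SPEC =====
def Spec_extract_context_around_keywords (text : String) (keywords : List String) (context_lines : Int) (out : List (String × Int × String)) : Prop := out = extract_context_around_keywords_alt text keywords context_lines
instance (text : String) (keywords : List String) (context_lines : Int) (out : List (String × Int × String)) : Decidable (Spec_extract_context_around_keywords text keywords context_lines out) := by unfold Spec_extract_context_around_keywords; infer_instance

-- ===== CLAIM (what is proved, stated in full; the proofs are below) =====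
def Claim_equal_extract_context_around_keywords : Prop := ∀ (text : String) (keywords : List String) (context_lines : Int), Dom_extract_context_around_keywords text keywords context_lines → Spec_extract_context_around_keywords text keywords context_lines (extract_context_around_keywords text keywords context_lines)

-- ===== LEMMAS AND PROOFS =====

-- first keyword (in list order) whose lowercase occurs in s
def pvFirstKw (kws : List String) (s : String) : Option String :=
  match kws with
  | [] => none
  | kw :: rest =>
    if PySem.Str.isIn (PySem.Str.lower kw) s then some kw else pvFirstKw rest s

-- the per-line match of A, as a (possibly empty) list
def pvHit (keywords : List String) (p : Int × String) : List (Int × String) :=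
  match pvFirstKw keywords (PySem.Str.lower p.2) with
  | some kw => [(p.1, kw)]
  | none => []

-- one step of A's dedup-and-append loop, as a function of the match (i, kw)
def pvAStep (lines : List String) (cl : Int)
    (st : List (String × Int × String) × PySem.Set (Int × Int)) (m : Int × String) :
    List (String × Int × String) × PySem.Set (Int × Int) :=
  let start := max 0 (m.1 - cl)
  let e := min ((lines.length : Int)) (m.1 + cl + 1)
  if PySem.Set.contains st.2 (start, e) then st
  else (st.1 ++ [(m.2, m.1 + 1, pvContext lines start e)], PySem.Set.add st.2 (start, e))

def pvRender (lines : List String) (q : (Int × Int) × (String × Int)) : String × Int × String :=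
  (q.2.1, q.2.2 + 1, pvContext lines q.1.1 q.1.2)

-- A's inner break-loop equals: look up the first keyword, then (maybe) one dedup step
theorem innerA_eq_firstKw (lines : List String) (cl i : Int) (ll : String)
    (kws : List String) (st : List (String × Int × String) × PySem.Set (Int × Int)) :
    pvInnerA lines cl i ll kws st =
      match pvFirstKw kws ll with
      | none => st
      | some kw => pvAStep lines cl st (i, kw) := by
  induction kws with
  | nil => rfl
  | cons kw rest ih =>
    by_cases h : PySem.Str.isIn (PySem.Str.lower kw) ll = true
    · simp only [pvInnerA, pvFirstKw, if_pos h]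
      rfl
    · simp only [pvInnerA, pvFirstKw, if_neg h]
      exact ih

-- A's main fold over lines = a fold of pvAStep over the flat match list
theorem foldA_eq_foldMatches (lines : List String) (cl : Int) (keywords : List String)
    (es : List (Int × String)) (st : List (String × Int × String) × PySem.Set (Int × Int)) :
    es.foldl (fun st p => pvInnerA lines cl p.1 (PySem.Str.lower p.2) keywords st) st =
    (es.flatMap (pvHit keywords)).foldl (pvAStep lines cl) st := by
  induction es generalizing st with
  | nil => rfl
  | cons p es ih =>
    simp only [List.foldl_cons, List.flatMap_cons, List.foldl_append]
    rw [innerA_eq_firstKw]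
    unfold pvHit
    cases pvFirstKw keywords (PySem.Str.lower p.2) with
    | none => exact ih st
    | some kw => exact ih _

-- a flatMap of 0/1-element hits is a filter-then-map
theorem flatMap_hits (l : List Int) (h : Int → Option String) :
    (l.flatMap (fun j => match h j with | some kw => [(j, kw)] | none => ([] : List (Int × String))))
    = (l.filter (fun j => (h j).isSome)).map (fun j => (j, (h j).getD "")) := by
  induction l with
  | nil => rfl
  | cons j l ih =>
    cases hj : h j <;> simp [List.flatMap_cons, hj, ih]


-- the sweep over one keyword, as a function of the match predicate
def pvSweepStep (c : String → Int → Bool) (st : PySem.Dict Int String × List Int) (kw : String) :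
    PySem.Dict Int String × List Int :=
  st.2.foldl (fun st2 i => if c kw i then (st2.1.insert i kw, st2.2) else (st2.1, st2.2 ++ [i]))
    (st.1, ([] : List Int))

theorem pvWinner_eq_sweep (keywords lows : List String) (n : Int) :
    pvWinner keywords lows n =
    (keywords.foldl
      (pvSweepStep (fun kw i => PySem.Str.isIn (PySem.Str.lower kw) (PySem.List.pyGetD lows i "")))
      (PySem.Dict.empty, PySem.List.pyRange 0 n 1)).1 := rfl

-- first keyword claiming index i, under an abstract match predicate
def pvFirstC (c : String → Int → Bool) (ks : List String) (i : Int) : Option String :=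
  match ks with
  | [] => none
  | kw :: rest => if c kw i then some kw else pvFirstC c rest i

theorem firstC_append (c : String → Int → Bool) (l1 l2 : List String) (i : Int) :
    pvFirstC c (l1 ++ l2) i =
      match pvFirstC c l1 i with
      | some w => some w
      | none => pvFirstC c l2 i := by
  induction l1 with
  | nil => rfl
  | cons kw rest ih =>
    by_cases h : c kw i = true
    · simp only [List.cons_append, pvFirstC, if_pos h]
    · simp only [List.cons_append, pvFirstC, if_neg h]; exact ih

theorem firstC_eq_firstKw (lows ks : List String) (i : Int) :
    pvFirstC (fun kw i => PySem.Str.isIn (PySem.Str.lower kw) (PySem.List.pyGetD lows i "")) ks i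
    = pvFirstKw ks (PySem.List.pyGetD lows i "") := by
  induction ks with
  | nil => rfl
  | cons kw rest ih =>
    by_cases h : PySem.Str.isIn (PySem.Str.lower kw) (PySem.List.pyGetD lows i "") = true
    · simp only [pvFirstC, pvFirstKw, if_pos h]
    · simp only [pvFirstC, pvFirstKw, if_neg h]; exact ih

-- one keyword's pool scan: effect on the dict lookup
theorem pool_get (q : Int → Bool) (kw : String) (us : List Int)
    (d : PySem.Dict Int String) (acc : List Int) (j : Int) :
    ((us.foldl (fun st2 i => if q i then (st2.1.insert i kw, st2.2) else (st2.1, st2.2 ++ [i]))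
        (d, acc)).1).get? j
    = if us.any (fun i => i == j && q i) then some kw else d.get? j := by
  induction us generalizing d acc with
  | nil => simp
  | cons i us ih =>
    simp only [List.foldl_cons, List.any_cons]
    by_cases hq : q i = true
    · rw [if_pos hq, ih]
      by_cases hm : (us.any fun i => i == j && q i) = true
      · rw [if_pos hm, if_pos (by rw [hm, Bool.or_true])]
      · have hm' : (us.any fun i => i == j && q i) = false := Bool.eq_false_iff.mpr hm
        by_cases hij : j = i
        · subst hij
          simp [hm', hq, PySem.Dict.get?_insert_self]
        · rw [if_neg hm, PySem.Dict.get?_insert_of_ne _ _ hij]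
          have hb : (i == j) = false := by simp; exact fun h => hij h.symm
          simp [hb, hm']
    · have hq' : q i = false := Bool.eq_false_iff.mpr hq
      rw [if_neg hq, ih]
      simp [hq']

-- one keyword's pool scan: the surviving pool
theorem pool_still (q : Int → Bool) (kw : String) (us : List Int)
    (d : PySem.Dict Int String) (acc : List Int) :
    ((us.foldl (fun st2 i => if q i then (st2.1.insert i kw, st2.2) else (st2.1, st2.2 ++ [i]))
        (d, acc)).2)
    = acc ++ us.filter (fun i => !(q i)) := by
  induction us generalizing d acc with
  | nil => simp
  | cons i us ih =>
    simp only [List.foldl_cons, List.filter_cons]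
    by_cases hq : q i = true
    · rw [if_pos hq, ih]
      simp [hq]
    · have hq' : q i = false := Bool.eq_false_iff.mpr hq
      rw [if_neg hq, ih]
      simp [hq']

-- one keyword's pool scan: keys stay distinct
theorem pool_nodup (q : Int → Bool) (kw : String) (us : List Int)
    (d : PySem.Dict Int String) (acc : List Int) (h : d.keys.Nodup) :
    ((us.foldl (fun st2 i => if q i then (st2.1.insert i kw, st2.2) else (st2.1, st2.2 ++ [i]))
        (d, acc)).1).keys.Nodup := by
  induction us generalizing d acc with
  | nil => exact h
  | cons i us ih =>
    simp only [List.foldl_cons]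
    by_cases hq : q i = true
    · rw [if_pos hq]; exact ih _ _ (PySem.Dict.nodup_keys_insert _ _ _ h)
    · rw [if_neg hq]; exact ih _ _ h

theorem sweepStep_get (c : String → Int → Bool) (kw : String)
    (st : PySem.Dict Int String × List Int) (j : Int) :
    ((pvSweepStep c st kw).1).get? j
    = if st.2.any (fun i => i == j && c kw i) then some kw else st.1.get? j :=
  pool_get (fun i => c kw i) kw st.2 st.1 [] j

theorem sweepStep_still (c : String → Int → Bool) (kw : String)
    (st : PySem.Dict Int String × List Int) :
    (pvSweepStep c st kw).2 = st.2.filter (fun i => !(c kw i)) := by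
  have := pool_still (fun i => c kw i) kw st.2 st.1 []
  simpa using this

theorem sweepStep_nodup (c : String → Int → Bool) (kw : String)
    (st : PySem.Dict Int String × List Int) (h : st.1.keys.Nodup) :
    ((pvSweepStep c st kw).1).keys.Nodup :=
  pool_nodup (fun i => c kw i) kw st.2 st.1 [] h


-- invariant of the whole sweep: lookups, the remaining pool, distinct keys
theorem sweep_inv (c : String → Int → Bool) (a b : Int) (ks : List String) :
    (∀ j, ((ks.foldl (pvSweepStep c) (PySem.Dict.empty, PySem.List.pyRange a b 1)).1).get? j
        = if a ≤ j ∧ j < b then pvFirstC c ks j else none)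
  ∧ ((ks.foldl (pvSweepStep c) (PySem.Dict.empty, PySem.List.pyRange a b 1)).2
      = (PySem.List.pyRange a b 1).filter (fun i => !(pvFirstC c ks i).isSome))
  ∧ ((ks.foldl (pvSweepStep c) (PySem.Dict.empty, PySem.List.pyRange a b 1)).1).keys.Nodup := by
  induction ks using List.reverseRecOn with
  | nil =>
    refine ⟨?_, ?_, ?_⟩
    · intro j; simp [pvFirstC, PySem.Dict.get?_empty]
    · simp [pvFirstC]
    · exact PySem.Dict.nodup_keys_empty
  | append_singleton ks kw ih =>
    obtain ⟨ih1, ih2, ih3⟩ := ih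
    rw [List.foldl_append]
    simp only [List.foldl_cons, List.foldl_nil]
    refine ⟨?_, ?_, ?_⟩
    · intro j
      rw [sweepStep_get]
      by_cases hin : a ≤ j ∧ j < b
      · rw [if_pos hin, firstC_append]
        cases hk : pvFirstC c ks j with
        | some w =>
          have hnot : ((ks.foldl (pvSweepStep c) (PySem.Dict.empty, PySem.List.pyRange a b 1)).2).any
              (fun i => i == j && c kw i) = false := by
            rw [ih2]
            rw [Bool.eq_false_iff]
            intro hany
            rcases List.any_eq_true.mp hany with ⟨i, hi, hp⟩
            rcases List.mem_filter.mp hi with ⟨_, hns⟩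
            have : i = j := by
              have hp' : i = j ∧ c kw i = true := by simpa using hp
              exact hp'.1
            subst this
            rw [hk] at hns
            simp at hns
          rw [hnot]
          simp only [Bool.false_eq_true, if_false]
          rw [ih1 j, if_pos hin, hk]
        | none =>
          by_cases hc : c kw j = true
          · have hyes : ((ks.foldl (pvSweepStep c) (PySem.Dict.empty, PySem.List.pyRange a b 1)).2).any
                (fun i => i == j && c kw i) = true := by
              rw [ih2]
              refine List.any_eq_true.mpr ⟨j, List.mem_filter.mpr ⟨?_, ?_⟩, ?_⟩
              · exact PySem.List.mem_pyRange_one.mpr hin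
              · rw [hk]; rfl
              · simp [hc]
            rw [hyes]
            simp only [if_true]
            simp [pvFirstC, hc]
          · have hno : ((ks.foldl (pvSweepStep c) (PySem.Dict.empty, PySem.List.pyRange a b 1)).2).any
                (fun i => i == j && c kw i) = false := by
              rw [Bool.eq_false_iff]
              intro hany
              rcases List.any_eq_true.mp hany with ⟨i, _, hp⟩
              have hp' : i = j ∧ c kw i = true := by simpa using hp
              exact hc (hp'.1 ▸ hp'.2)
            rw [hno]
            simp only [Bool.false_eq_true, if_false]
            rw [ih1 j, if_pos hin, hk]
            have hc' : c kw j = false := Bool.eq_false_iff.mpr hc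
            simp [pvFirstC, hc']
      · rw [if_neg hin]
        have hno : ((ks.foldl (pvSweepStep c) (PySem.Dict.empty, PySem.List.pyRange a b 1)).2).any
            (fun i => i == j && c kw i) = false := by
          rw [ih2, Bool.eq_false_iff]
          intro hany
          rcases List.any_eq_true.mp hany with ⟨i, hi, hp⟩
          rcases List.mem_filter.mp hi with ⟨hr, _⟩
          have hp' : i = j ∧ c kw i = true := by simpa using hp
          exact hin (hp'.1 ▸ PySem.List.mem_pyRange_one.mp hr)
        rw [hno]
        simp only [Bool.false_eq_true, if_false]
        rw [ih1 j, if_neg hin]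
    · rw [sweepStep_still, ih2, List.filter_filter]
      apply List.filter_congr
      intro i _
      rw [firstC_append]
      cases pvFirstC c ks i with
      | some w => simp
      | none =>
        by_cases hc : c kw i = true
        · simp [pvFirstC, hc]
        · have hc' : c kw i = false := Bool.eq_false_iff.mpr hc
          simp [pvFirstC, hc']
    · exact sweepStep_nodup _ _ _ ih3

-- lookup in the winner dict = first matching keyword, for indices in range
theorem winner_get_in (keywords lows : List String) (n j : Int) (h : 0 ≤ j ∧ j < n) :
    (pvWinner keywords lows n).get? j = pvFirstKw keywords (PySem.List.pyGetD lows j "") := by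
  rw [pvWinner_eq_sweep, (sweep_inv _ 0 n keywords).1 j, if_pos h, firstC_eq_firstKw]

-- lookup in the winner dict is none outside the index range
theorem winner_get_out (keywords lows : List String) (n j : Int) (h : ¬ (0 ≤ j ∧ j < n)) :
    (pvWinner keywords lows n).get? j = none := by
  rw [pvWinner_eq_sweep, (sweep_inv _ 0 n keywords).1 j, if_neg h]

theorem winner_nodup (keywords lows : List String) (n : Int) :
    (pvWinner keywords lows n).keys.Nodup := by
  rw [pvWinner_eq_sweep]
  exact (sweep_inv _ 0 n keywords).2.2

-- sorted(winner) is exactly the in-order list of matching line indices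
theorem sorted_winner (keywords lows : List String) (n : Int) :
    PySem.List.sorted (pvWinner keywords lows n).keys (fun x => x) false
    = (PySem.List.pyRange 0 n 1).filter
        (fun i => (pvFirstKw keywords (PySem.List.pyGetD lows i "")).isSome) := by
  apply PySem.List.sorted_eq_of_perm_of_pairwise_lt
  · rw [List.perm_ext_iff_of_nodup
      ((PySem.List.nodup_pyRange_one 0 n).filter _)
      (winner_nodup keywords lows n)]
    intro i
    rw [List.mem_filter, PySem.List.mem_pyRange_one]
    constructor
    · rintro ⟨⟨h0, hL⟩, hs⟩
      have hg := winner_get_in keywords lows n i ⟨h0, hL⟩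
      by_contra hmem
      rw [← PySem.Dict.get?_eq_none_iff_not_mem_keys] at hmem
      rw [hmem] at hg
      simp [← hg] at hs
    · intro hmem
      by_cases h : 0 ≤ i ∧ i < n
      · refine ⟨h, ?_⟩
        have hg := winner_get_in keywords lows n i h
        cases hk : pvFirstKw keywords (PySem.List.pyGetD lows i "") with
        | some kw => simp
        | none =>
          rw [hk] at hg
          exact absurd hmem ((PySem.Dict.get?_eq_none_iff_not_mem_keys _ _).mp hg)
      · exact absurd ((PySem.Dict.get?_eq_none_iff_not_mem_keys _ _).mp
          (winner_get_out keywords lows n i h)) (by simpa using hmem)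
  · exact (PySem.List.pairwise_lt_pyRange_one 0 n).filter _

-- the two dedup loops agree: A's (results, seen-set) fold vs B's setdefault dict
theorem fold_rel (lines : List String) (cl : Int) :
    ∀ (ms : List (Int × String)) (st : List (String × Int × String) × PySem.Set (Int × Int))
      (d : PySem.Dict (Int × Int) (String × Int)),
      st.1 = d.items.map (pvRender lines) →
      (∀ k, PySem.Set.contains st.2 k = d.contains k) →
      (ms.foldl (pvAStep lines cl) st).1 =
      ((ms.foldl (fun d (m : Int × String) =>
          d.setdefault (max 0 (m.1 - cl), min ((lines.length : Int)) (m.1 + cl + 1)) (m.2, m.1)) d).items).map (pvRender lines)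
  | [], st, d, h1, _ => by simpa using h1
  | m :: ms, st, d, h1, h2 => by
    simp only [List.foldl_cons]
    by_cases hd : d.contains (max 0 (m.1 - cl), min ((lines.length : Int)) (m.1 + cl + 1)) = true
    · rw [PySem.Dict.setdefault_of_contains _ _ hd]
      have hs : PySem.Set.contains st.2 (max 0 (m.1 - cl), min ((lines.length : Int)) (m.1 + cl + 1)) = true := by
        rw [h2]; exact hd
      have hst : pvAStep lines cl st m = st := by
        unfold pvAStep; rw [if_pos hs]
      rw [hst]
      exact fold_rel lines cl ms st d h1 h2
    · have hd' : d.contains (max 0 (m.1 - cl), min ((lines.length : Int)) (m.1 + cl + 1)) = false :=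
        Bool.eq_false_iff.mpr hd
      have hs : PySem.Set.contains st.2 (max 0 (m.1 - cl), min ((lines.length : Int)) (m.1 + cl + 1)) = false := by
        rw [h2]; exact hd'
      have hmem : (max 0 (m.1 - cl), min ((lines.length : Int)) (m.1 + cl + 1)) ∉ st.2 := by
        intro hmem
        rw [(PySem.Set.contains_iff st.2 _).mpr hmem] at hs
        exact Bool.true_eq_false ▸ hs
      have hst : pvAStep lines cl st m =
          (st.1 ++ [(m.2, m.1 + 1, pvContext lines (max 0 (m.1 - cl)) (min ((lines.length : Int)) (m.1 + cl + 1)))],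
           PySem.Set.add st.2 (max 0 (m.1 - cl), min ((lines.length : Int)) (m.1 + cl + 1))) := by
        unfold pvAStep
        rw [if_neg (by rw [hs]; exact Bool.false_ne_true)]
      rw [hst, PySem.Dict.setdefault_of_not_contains _ _ hd']
      apply fold_rel lines cl ms
      · rw [PySem.Dict.items_insert_of_not_contains _ _ hd', List.map_append, ← h1]
        rfl
      · intro k
        rw [Bool.eq_iff_iff, PySem.Set.contains_iff, PySem.Set.add_of_not_mem hmem]
        rw [PySem.Dict.contains_insert]
        simp only [List.mem_append, List.mem_singleton, Bool.or_eq_true, beq_iff_eq]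
        rw [← PySem.Set.contains_iff, h2]
        tauto

-- A's whole body equals B's whole body, for any line list
theorem bodies_eq (lines keywords : List String) (cl : Int) :
    ((PySem.List.enumerate lines 0).foldl
        (fun st p => pvInnerA lines cl p.1 (PySem.Str.lower p.2) keywords st)
        ([], PySem.Set.empty)).1 =
    ((pvByRange lines cl (pvWinner keywords (lines.map PySem.Str.lower) (lines.length : Int))).items).map (pvRender lines) := by
  have hlow : ∀ j : Int, PySem.List.pyGetD (lines.map PySem.Str.lower) j ""
      = PySem.Str.lower (PySem.List.pyGetD lines j "") := by
    intro j
    exact PySem.List.pyGetD_map PySem.Str.lower lines j ""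
  -- the shared match predicate
  set h : Int → Option String := fun j => pvFirstKw keywords (PySem.Str.lower (PySem.List.pyGetD lines j "")) with hh
  -- A's side: flatten to the match list, then the dedup fold
  rw [foldA_eq_foldMatches]
  rw [show PySem.List.enumerate lines 0 = PySem.List.enumerate lines from rfl,
    PySem.List.enumerate_eq_map_pyRange lines "", List.flatMap_map]
  have hms : (PySem.List.pyRange 0 (PySem.List.len lines) 1).flatMap
        (fun j => pvHit keywords (j, PySem.List.pyGetD lines j ""))
      = ((PySem.List.pyRange 0 (PySem.List.len lines) 1).filter (fun j => (h j).isSome)).map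
          (fun j => (j, (h j).getD "")) := by
    rw [← flatMap_hits]
    congr 1
  rw [hms]
  -- B's side: sorted winner keys = the same filtered range
  unfold pvByRange
  rw [sorted_winner keywords (lines.map PySem.Str.lower) (lines.length : Int)]
  have hfilt : (PySem.List.pyRange 0 (lines.length : Int) 1).filter
        (fun i => (pvFirstKw keywords (PySem.List.pyGetD (lines.map PySem.Str.lower) i "")).isSome)
      = (PySem.List.pyRange 0 (PySem.List.len lines) 1).filter (fun j => (h j).isSome) := by
    rw [show (PySem.List.len lines) = ((lines.length : Int)) from rfl]
    apply List.filter_congr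
    intro j hj
    rw [hlow j, hh]
  rw [hfilt]
  -- replace winner.getD by (h j).getD "" inside the fold
  rw [PySem.List.foldl_congr_mem _ _
    (fun d (i : Int) => d.setdefault (max 0 (i - cl), min ((lines.length : Int)) (i + cl + 1)) ((h i).getD "", i)) _
    (by
      intro acc i hi
      rw [List.mem_filter, PySem.List.mem_pyRange_one] at hi
      have hg : (pvWinner keywords (lines.map PySem.Str.lower) (lines.length : Int)).get? i = h i := by
        rw [winner_get_in keywords (lines.map PySem.Str.lower) ((lines.length : Int)) i ⟨hi.1.1, hi.1.2⟩, hlow i]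
      rw [PySem.Dict.getD_eq_get?_getD, hg])]
  -- turn the fold over indices into a fold over the match list
  have hB : (List.foldl
        (fun d i => d.setdefault (max 0 (i - cl), min ((lines.length : Int)) (i + cl + 1)) ((h i).getD "", i))
        PySem.Dict.empty
        ((PySem.List.pyRange 0 (PySem.List.len lines) 1).filter (fun j => (h j).isSome)))
      = (List.foldl
        (fun d (m : Int × String) =>
          d.setdefault (max 0 (m.1 - cl), min ((lines.length : Int)) (m.1 + cl + 1)) (m.2, m.1))
        PySem.Dict.empty
        (((PySem.List.pyRange 0 (PySem.List.len lines) 1).filter (fun j => (h j).isSome)).map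
          (fun j => (j, (h j).getD "")))) :=
    (List.foldl_map (f := fun j => ((j : Int), (h j).getD ""))
      (g := fun d (m : Int × String) =>
        d.setdefault (max 0 (m.1 - cl), min ((lines.length : Int)) (m.1 + cl + 1)) (m.2, m.1))
      (l := (PySem.List.pyRange 0 (PySem.List.len lines) 1).filter (fun j => (h j).isSome))
      (init := PySem.Dict.empty)).symm
  rw [hB]
  exact fold_rel lines cl _ ([], PySem.Set.empty) PySem.Dict.empty rfl
    (fun k => by rw [PySem.Dict.contains_empty]; rfl)

-- ===== VERDICT (by name: the statement is the Claim_ definition above) =====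
theorem extract_context_around_keywords_spec : Claim_equal_extract_context_around_keywords := by
  intro text keywords context_lines _
  unfold Spec_extract_context_around_keywords
  unfold extract_context_around_keywords extract_context_around_keywords_alt
  exact bodies_eq _ keywords context_lines
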